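-- pv_equiv track=rewrite | github.com/raphaelyuster/almost-k-union-closed | polynomial.py | cr
-- ===== SOURCE A (Python) =====
-- def cr(k, t, j):
--     if j > t:
--         return 0
--     if j == 0:
--         if t == 0:
--             return 1
--         return 0
--     return cr(k, t - 1, j) * (j * k - t + 1) + cr(k, t - 1, j - 1) * k
-- ===== SOURCE B (Python) =====
-- def cr(k, t, j):
--     if j > t or j < 0:
--         return 0
--     row = [1] + [0] * j          # row[jp] = cr(k, 0, jp)
--     for tp in range(1, t + 1):   # row[jp] becomes cr(k, tp, jp)
--         new = []
--         prev = 0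
--         for jp, cur in enumerate(row):
--             new.append(cur * (jp * k - tp + 1) + prev * k)
--             prev = cur
--         row = new
--     return row[j]
-- ===== Notes on version B (the rewrite author's own statement) =====
-- stated objective: alternative
-- what changed: Replaced the top-down binary recursion (which recomputes each (t,j) subproblem exponentially often) with an iterative dynamic program that builds one row of coefficients per t-level, computing each subresult once.
import Mathlib
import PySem

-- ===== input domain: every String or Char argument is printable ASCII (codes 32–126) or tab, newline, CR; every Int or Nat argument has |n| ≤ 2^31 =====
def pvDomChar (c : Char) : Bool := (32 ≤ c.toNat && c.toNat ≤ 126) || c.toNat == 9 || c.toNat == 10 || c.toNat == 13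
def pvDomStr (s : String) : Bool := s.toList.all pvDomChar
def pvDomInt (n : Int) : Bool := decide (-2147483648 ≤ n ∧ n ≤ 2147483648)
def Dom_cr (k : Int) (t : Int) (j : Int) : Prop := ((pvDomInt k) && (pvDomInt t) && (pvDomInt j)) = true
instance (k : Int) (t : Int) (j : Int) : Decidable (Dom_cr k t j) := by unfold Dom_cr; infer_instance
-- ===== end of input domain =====

-- B replaces A's top-down binary recursion by an iterative row-by-row dynamic program that computes each (t,j) subresult once.

-- ===== PORT A =====
-- fuel only makes A's recursion total in Lean; fuel = t.toNat + 1 is enough on every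
-- input where the Python A returns (Pre_cr), so the guard is never an algorithm switch.
def crFuel (k : Int) : Nat → Int → Int → Int
  | 0, _, _ => 0
  | fuel+1, t, j =>
    if j > t then 0
    else if j = 0 then (if t = 0 then 1 else 0)
    else crFuel k fuel (t-1) j * (j * k - t + 1) + crFuel k fuel (t-1) (j-1) * k

def cr (k : Int) (t : Int) (j : Int) : Int := crFuel k (t.toNat + 1) t j

-- ===== PORT B =====
-- inner loop of Source B: one pass over the row with an index jp and the previous element prev
def crStep (k tp : Int) : Nat → Int → List Int → List Int
  | _, _, [] => []
  | jp, prev, cur :: rest =>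
      (cur * ((jp : Int) * k - tp + 1) + prev * k) :: crStep k tp (jp+1) cur rest

def cr_alt (k : Int) (t : Int) (j : Int) : Int :=
  if j > t ∨ j < 0 then 0
  else
    let row0 : List Int := 1 :: List.replicate j.toNat 0
    let row := (PySem.List.pyRange 1 (t+1) 1).foldl (fun row tp => crStep k tp 0 0 row) row0
    PySem.List.pyGetD row j 0

-- ===== PRECONDITION & SPEC =====
-- Pre_cr excludes exactly the inputs with j < 0 ≤ t - j ... i.e. j < 0 ∧ j ≤ t, on which the
-- Python A recurses forever along the (t-1, j-1) branch and raises RecursionError.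
def Pre_cr (k : Int) (t : Int) (j : Int) : Prop := 0 ≤ j ∨ t < j
instance (k : Int) (t : Int) (j : Int) : Decidable (Pre_cr k t j) := by unfold Pre_cr; infer_instance
def pvWitness_cr : Int × Int × Int := (2, 4, 2)

def Spec_cr (k : Int) (t : Int) (j : Int) (out : Int) : Prop := out = cr_alt k t j
instance (k : Int) (t : Int) (j : Int) (out : Int) : Decidable (Spec_cr k t j out) := by unfold Spec_cr; infer_instance

-- ===== CLAIM (what is proved, stated in full; the proofs are below) =====
def Claim_equal_cr : Prop := ∀ (k : Int) (t : Int) (j : Int), Dom_cr k t j → Pre_cr k t j → Spec_cr k t j (cr k t j)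

-- ===== LEMMAS AND PROOFS =====

-- the mathematical coefficient, recursion on the Nat level t
def cmath (k : Int) : Nat → Nat → Int
  | 0, 0 => 1
  | 0, _+1 => 0
  | t+1, j =>
    if j > t+1 then 0
    else if j = 0 then 0
    else cmath k t j * ((j:Int) * k - ((t:Int)+1) + 1) + cmath k t (j-1) * k

theorem cmath_of_gt (k : Int) (t j : Nat) (h : t < j) : cmath k t j = 0 := by
  cases t with
  | zero => cases j with
    | zero => omega
    | succ m => simp [cmath]
  | succ m => simp [cmath]; omega

theorem cmath_zero_right (k : Int) (t : Nat) (h : 0 < t) : cmath k t 0 = 0 := by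
  cases t with
  | zero => omega
  | succ m => simp [cmath]

-- the full recurrence, including the jp = 0 column and the jp > t region
theorem cmath_succ (k : Int) (T jp : Nat) :
    cmath k (T+1) jp =
      cmath k T jp * ((jp:Int) * k - ((T:Int)+1) + 1)
      + (if jp = 0 then 0 else cmath k T (jp-1)) * k := by
  rcases Nat.eq_zero_or_pos jp with h0 | hpos
  · subst h0
    rcases Nat.eq_zero_or_pos T with hT | hT
    · subst hT; simp [cmath]
    · rw [cmath_zero_right k (T+1) (by omega), cmath_zero_right k T hT]; simp
  · by_cases hgt : T + 1 < jp
    · rw [cmath_of_gt k (T+1) jp hgt, cmath_of_gt k T jp (by omega),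
        cmath_of_gt k T (jp-1) (by omega)]
      simp [Nat.pos_iff_ne_zero.mp hpos]
    · have hne : jp ≠ 0 := by omega
      conv_lhs => rw [cmath]
      simp only [if_neg (by omega : ¬ jp > T + 1), if_neg hne]

-- the inner pass maps one row of cmath to the next
theorem crStep_map (k : Int) (T : Nat) :
    ∀ (m jp0 : Nat) (prev : Int),
      prev = (if jp0 = 0 then 0 else cmath k T (jp0 - 1)) →
      crStep k ((T:Int)+1) jp0 prev ((List.range' jp0 m).map (cmath k T))
        = (List.range' jp0 m).map (cmath k (T+1)) := by
  intro m
  induction m with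
  | zero => intro jp0 prev _; simp [crStep]
  | succ n ih =>
    intro jp0 prev hprev
    rw [List.range'_succ]
    simp only [List.map_cons, crStep]
    congr 1
    · rw [cmath_succ k T jp0, hprev]
    · exact ih (jp0+1) (cmath k T jp0) (by simp)

-- the initial row is the t = 0 row of cmath
theorem row0_eq (k : Int) : ∀ (n : Nat),
    (1 : Int) :: List.replicate n 0 = (List.range (n+1)).map (cmath k 0) := by
  have h : ∀ n : Nat, List.replicate n (0 : Int) = (List.range' 1 n).map (cmath k 0) := by
    intro n
    induction n with
    | zero => simp
    | succ m ih =>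
      rw [List.range'_1_concat, List.map_append, ← ih, List.replicate_succ']
      simp only [List.map_cons, List.map_nil]
      rw [← cmath_of_gt k 0 (1+m) (by omega)]
  intro n
  rw [List.range_eq_range', List.range'_succ, List.map_cons, ← h]
  simp [cmath]

-- the outer loop: after rows 1..n the row holds cmath k n
theorem fold_rows (k : Int) (jn : Nat) : ∀ (n : Nat),
    (PySem.List.pyRange 1 ((n:Int)+1) 1).foldl (fun row tp => crStep k tp 0 0 row)
        ((List.range (jn+1)).map (cmath k 0))
      = (List.range (jn+1)).map (cmath k n) := by
  intro n
  induction n with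
  | zero => rw [PySem.List.pyRange_one_eq_nil (by omega)]; rfl
  | succ m ih =>
    have hsplit : PySem.List.pyRange 1 ((m:Int)+1+1) 1
        = PySem.List.pyRange 1 ((m:Int)+1) 1 ++ [(m:Int)+1] := by
      exact PySem.List.pyRange_one_succ_right (by omega)
    push_cast
    rw [hsplit, List.foldl_append, ih]
    simp only [List.foldl_cons, List.foldl_nil]
    rw [List.range_eq_range', crStep_map k m (jn+1) 0 0 (by simp), ← List.range_eq_range']

-- B computes cmath on the real domain
theorem cr_alt_eq_cmath (k t j : Int) (hj : 0 ≤ j) (hjt : j ≤ t) :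
    cr_alt k t j = cmath k t.toNat j.toNat := by
  unfold cr_alt
  rw [if_neg (by omega)]
  show PySem.List.pyGetD ((PySem.List.pyRange 1 (t+1) 1).foldl (fun row tp => crStep k tp 0 0 row)
      ((1 : Int) :: List.replicate j.toNat 0)) j 0 = cmath k t.toNat j.toNat
  have ht : (t.toNat : Int) = t := by omega
  have hrow := fold_rows k j.toNat t.toNat
  simp only [ht] at hrow
  rw [row0_eq k j.toNat, hrow]
  have hjj : j = ((j.toNat : Int)) := by omega
  rw [hjj, PySem.List.pyGetD_natCast]
  exact PySem.List.getD_map_range _ _ _ _ (by omega)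

-- A computes cmath on the real domain, given enough fuel
theorem crFuel_eq_cmath (k : Int) : ∀ (fuel : Nat) (t j : Int), 0 ≤ t → 0 ≤ j →
    t.toNat < fuel → crFuel k fuel t j = cmath k t.toNat j.toNat := by
  intro fuel
  induction fuel with
  | zero => intro t j _ _ h; omega
  | succ m ih =>
    intro t j ht hj hfuel
    rw [crFuel]
    by_cases hgt : j > t
    · rw [if_pos hgt, cmath_of_gt k _ _ (by omega)]
    · rw [if_neg hgt]
      by_cases hz : j = 0
      · rw [if_pos hz]
        by_cases htz : t = 0
        · rw [if_pos htz]; subst hz htz; simp [cmath]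
        · rw [if_neg htz, hz]
          exact (cmath_zero_right k t.toNat (by omega)).symm
      · rw [if_neg hz]
        have ht1 : 1 ≤ t := by omega
        rw [ih (t-1) j (by omega) hj (by omega),
            ih (t-1) (j-1) (by omega) (by omega) (by omega)]
        have hT : t.toNat = (t-1).toNat + 1 := by omega
        rw [hT, cmath_succ k ((t-1).toNat) j.toNat]
        have hjj : ((j.toNat : Int)) = j := by omega
        have hjp : j.toNat ≠ 0 := by omega
        rw [if_neg hjp]
        have h1 : ((j.toNat : Int)) * k - (((t-1).toNat : Int)+1) + 1 = j * k - t + 1 := by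
          rw [hjj]
          have ht' : ((t-1).toNat : Int) = t - 1 := by omega
          rw [ht']; ring
        have h2 : j.toNat - 1 = (j-1).toNat := by omega
        rw [h1, h2]

-- ===== VERDICT (by name: the statement is the Claim_ definition above) =====
theorem cr_spec : Claim_equal_cr := by
  intro k t j _ hpre
  unfold Spec_cr
  by_cases hgt : j > t
  · unfold cr cr_alt
    rw [crFuel, if_pos hgt, if_pos (Or.inl hgt)]
  · have hj : 0 ≤ j := by unfold Pre_cr at hpre; omega
    have ht : 0 ≤ t := by omega
    unfold cr
    rw [crFuel_eq_cmath k _ t j ht hj (by omega), cr_alt_eq_cmath k t j hj (by omega)]
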